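-- pv_equiv track=rewrite | github.com/ahanapradhan/UnionExtraction | mysite/unmasque/refactored/aoa.py | partitions_with_min_elements
-- ===== SOURCE A (Python) =====
-- def partitions_with_min_elements(arr, min_elements=2):
--     n = len(arr)
--
--     # Memoization dictionary to store already computed partitions
--     memo = {}
--
--     def dp(index, subsets, min_elements):
--         if index == n:
--             key = tuple(tuple(sorted(subset)) for subset in subsets)
--             if all(len(subset) >= min_elements for subset in subsets):
--                 return [subsets] if key not in memo else []
--             else:
--                 return []
--
--         key = (index, tuple(tuple(sorted(subset)) for subset in subsets))
--         if key in memo: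
--             return memo[key]
--
--         result = []
--
--         for i, subset in enumerate(subsets):
--             new_subsets = subsets[:i] + [subset + [arr[index]]] + subsets[i + 1:]
--             result += dp(index + 1, new_subsets, min_elements)
--
--         if len(subsets) < min_elements:
--             result += dp(index + 1, subsets + [[arr[index]]], min_elements)
--
--         memo[key] = result
--         return result
--
--     partitions = dp(0, [[]] * min_elements, min_elements)
--     return partitions
-- ===== SOURCE B (Python) =====
-- def _assignments(k, n):
--     # all length-n lists over range(k), lexicographic (first position most significant)
--     if n == 0:
--         return [[]]
--     rest = _assignments(k, n - 1)
--     return [[b] + t for b in range(k) for t in rest]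
--
--
-- def partitions_with_min_elements(arr, min_elements=2):
--     result = []
--     for assignment in _assignments(min_elements, len(arr)):
--         buckets = [[] for _ in range(min_elements)]
--         for i, b in enumerate(assignment):
--             buckets[b].append(arr[i])
--         if all(len(bucket) >= min_elements for bucket in buckets):
--             result.append(buckets)
--     return result
-- ===== Notes on version B (the rewrite author's own statement) =====
-- stated objective: simpler
-- what changed: Replaces A's DFS with a memoization dict (whose memo and add-a-subset branch are inert on distinct-valued input) by a direct enumeration of all assignments of elements to the fixed min_elements buckets, keeping those where every bucket is large enough.
import Mathlib
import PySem

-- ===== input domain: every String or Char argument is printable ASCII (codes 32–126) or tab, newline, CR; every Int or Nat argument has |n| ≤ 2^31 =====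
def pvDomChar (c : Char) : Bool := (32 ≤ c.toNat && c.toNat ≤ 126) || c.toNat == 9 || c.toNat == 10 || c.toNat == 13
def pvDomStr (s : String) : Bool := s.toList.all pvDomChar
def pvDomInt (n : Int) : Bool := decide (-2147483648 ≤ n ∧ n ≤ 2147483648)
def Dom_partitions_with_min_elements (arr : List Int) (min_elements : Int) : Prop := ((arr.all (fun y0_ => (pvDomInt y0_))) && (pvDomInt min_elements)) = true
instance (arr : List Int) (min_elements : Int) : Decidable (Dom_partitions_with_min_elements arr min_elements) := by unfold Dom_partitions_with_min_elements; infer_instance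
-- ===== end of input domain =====

-- B replaces A's memoized DFS (whose memo and add-a-subset branch are inert on the admitted inputs)
-- by a direct enumeration of all bucket assignments: simpler, same exponential cost.


-- ===== PORT A =====
-- memo keys: internal nodes use (some index, sorted buckets); the leaf lookup key
-- tuple(tuple(sorted(...))) can never equal an (int, …) tuple, modelled by first component none.
abbrev PKey := Option Int × List (List Int)
abbrev PMemo := PySem.Dict PKey (List (List (List Int)))

-- tuple(tuple(sorted(subset)) for subset in subsets)
def pvSortedKey (subsets : List (List Int)) : List (List Int) :=
  subsets.map (fun s => PySem.List.sorted s (fun x => x) false)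

def pvDpA (arr : List Int) (n : Nat) (min_elements : Int)
    (fuel index : Nat) (subsets : List (List Int)) (memo : PMemo) :
    List (List (List Int)) × PMemo :=
  if index = n then
    if subsets.all (fun s => decide (min_elements ≤ (s.length : Int))) then
      (if (memo.get? (none, pvSortedKey subsets)).isSome then [] else [subsets], memo)
    else ([], memo)
  else
    match fuel with
    | 0 => ([], memo)  -- unreachable: fuel = n - index on every actual call
    | fuel' + 1 =>
      let key : PKey := (some (index : Int), pvSortedKey subsets)
      match memo.get? key with
      | some v => (v, memo)
      | none =>
        let x := arr.getD index 0   -- arr[index]; index < n = arr.length on actual calls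
        let step := (PySem.List.enumerate subsets).foldl
          (fun (acc : List (List (List Int)) × PMemo) p =>
            let i := p.1.toNat
            let new_subsets := subsets.take i ++ [p.2 ++ [x]] ++ subsets.drop (i+1)
            let r := pvDpA arr n min_elements fuel' (index+1) new_subsets acc.2
            (acc.1 ++ r.1, r.2)) ([], memo)
        let step2 :=
          if (subsets.length : Int) < min_elements then
            let r := pvDpA arr n min_elements fuel' (index+1) (subsets ++ [[x]]) step.2
            (step.1 ++ r.1, r.2)
          else step
        (step2.1, step2.2.insert key step2.1)

-- [[]] * min_elements is List.replicate min_elements.toNat [] (negative repetition gives [])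
def partitions_with_min_elements (arr : List Int) (min_elements : Int) : List (List (List Int)) :=
  (pvDpA arr arr.length min_elements arr.length 0 (List.replicate min_elements.toNat []) PySem.Dict.empty).1

-- ===== PORT B =====
-- _assignments(k, n): all length-n lists over range(k), first position most significant
def pvAssignments (k : Int) : Nat → List (List Int)
  | 0 => [[]]
  | n+1 => (PySem.List.pyRange 0 k 1).flatMap (fun b => (pvAssignments k n).map (fun t => b :: t))

-- buckets = [[] for _ in range(min_elements)]; for i, b in enumerate(assignment): buckets[b].append(arr[i])
def pvBuckets (arr : List Int) (min_elements : Int) (assignment : List Int) : List (List Int) :=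
  (PySem.List.enumerate assignment).foldl
    (fun bs p => bs.set p.2.toNat ((bs.getD p.2.toNat []) ++ [arr.getD p.1.toNat 0]))
    ((PySem.List.pyRange 0 min_elements 1).map (fun _ => ([] : List Int)))

def partitions_with_min_elements_alt (arr : List Int) (min_elements : Int) : List (List (List Int)) :=
  (pvAssignments min_elements arr.length).foldl
    (fun result assignment =>
      let buckets := pvBuckets arr min_elements assignment
      if buckets.all (fun b => decide (min_elements ≤ (b.length : Int))) then result ++ [buckets]
      else result) []

-- ===== PRECONDITION & SPEC =====
-- Pre_ excludes arrays with duplicate values when min_elements ≥ 2: there A's memo, keyed on the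
-- SORTED bucket contents, can collide two distinct search states, and the within/between-bucket
-- orderings A then emits are accidental artefacts of the memoization; B emits the natural
-- index-order buckets.  (With min_elements ≤ 1 or pairwise-distinct values no collision exists.)
def Pre_partitions_with_min_elements (arr : List Int) (min_elements : Int) : Prop :=
  min_elements ≤ 1 ∨ arr.Nodup
instance (arr : List Int) (min_elements : Int) : Decidable (Pre_partitions_with_min_elements arr min_elements) := by unfold Pre_partitions_with_min_elements; infer_instance

def pvWitness_partitions_with_min_elements : List Int × Int := ([1, 2, 3, 4], 2)

def Spec_partitions_with_min_elements (arr : List Int) (min_elements : Int) (out : List (List (List Int))) : Prop := out = partitions_with_min_elements_alt arr min_elements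
instance (arr : List Int) (min_elements : Int) (out : List (List (List Int))) : Decidable (Spec_partitions_with_min_elements arr min_elements out) := by unfold Spec_partitions_with_min_elements; infer_instance

-- ===== CLAIM (what is proved, stated in full; the proofs are below) =====
def Claim_equal_partitions_with_min_elements : Prop := ∀ (arr : List Int) (min_elements : Int), Dom_partitions_with_min_elements arr min_elements → Pre_partitions_with_min_elements arr min_elements → Spec_partitions_with_min_elements arr min_elements (partitions_with_min_elements arr min_elements)

-- ===== LEMMAS AND PROOFS =====

-- `all buckets large enough`
def pvOk (m : Int) (bs : List (List Int)) : Bool :=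
  bs.all (fun s => decide (m ≤ (s.length : Int)))

-- the bucket-filling loop, over explicit (bucket index, value) pairs
def pvApply (bs : List (List Int)) (l : List (Nat × Int)) : List (List Int) :=
  l.foldl (fun bs p => bs.set p.1 (bs.getD p.1 [] ++ [p.2])) bs

-- the state of A's search after assigning arr[0..p.length-1] to buckets p
def pvSt (arr : List Int) (L : Nat) (p : List Nat) : List (List Int) :=
  pvApply (List.replicate L []) (p.zip arr)

-- A's dp with the memoization removed (same recursion, same order)
def pvDpN (arr : List Int) (n : Nat) (m : Int) (fuel index : Nat)
    (subsets : List (List Int)) : List (List (List Int)) :=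
  if index = n then
    if pvOk m subsets then [subsets] else []
  else
    match fuel with
    | 0 => []
    | fuel' + 1 =>
      let x := arr.getD index 0
      let step := (PySem.List.enumerate subsets).foldl
        (fun acc p =>
          acc ++ pvDpN arr n m fuel' (index+1)
            (subsets.take p.1.toNat ++ [p.2 ++ [x]] ++ subsets.drop (p.1.toNat+1))) []
      if (subsets.length : Int) < m then
        step ++ pvDpN arr n m fuel' (index+1) (subsets ++ [[x]])
      else step

-- Nat-level assignments, mirror of pvAssignments
def pvAssignN (L : Nat) : Nat → List (List Nat)
  | 0 => [[]]
  | n+1 => (List.range L).flatMap (fun b => (pvAssignN L n).map (fun t => b :: t))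

-- the product-fold specification both programs reduce to
def pvSpecFold (arr : List Int) (m : Int) (index : Nat) (subsets : List (List Int)) (fuel : Nat) :
    List (List (List Int)) :=
  (pvAssignN m.toNat fuel).foldl
    (fun acc asg =>
      let bk := pvApply subsets (asg.zip (arr.drop index))
      if pvOk m bk then acc ++ [bk] else acc) []

def pvKeyOf (arr : List Int) (L : Nat) (q : List Nat) : PKey :=
  (some (q.length : Int), pvSortedKey (pvSt arr L q))

-- keys of the internal states of the subtree rooted at prefix p
def pvExt (arr : List Int) (L n : Nat) (p : List Nat) (k : PKey) : Prop :=
  ∃ e, (∀ b ∈ e, b < L) ∧ p.length + e.length < n ∧ k = pvKeyOf arr L (p ++ e)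

lemma pvApply_length (l : List (Nat × Int)) (bs : List (List Int)) :
    (pvApply bs l).length = bs.length := by
  induction l generalizing bs with
  | nil => rfl
  | cons pr t ih => simp [pvApply, List.foldl_cons] at ih ⊢; rw [ih, List.length_set]


lemma pvZip_snoc (p : List Nat) (c : Nat) (arr : List Int) (h : p.length < arr.length) :
    (p ++ [c]).zip arr = p.zip arr ++ [(c, arr.getD p.length 0)] := by
  induction p generalizing arr with
  | nil => cases arr with
    | nil => simp at h
    | cons a t => simp
  | cons b q ih =>
    cases arr with
    | nil => simp at h
    | cons a t =>
      simp only [List.cons_append, List.zip_cons_cons, List.getD_cons_succ, List.length_cons]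
      rw [ih t (by simpa using h)]


lemma pvApply_getD (l : List (Nat × Int)) (bs : List (List Int)) (b : Nat)
    (hb : b < bs.length) (hl : ∀ pr ∈ l, pr.1 < bs.length) :
    (pvApply bs l).getD b [] =
      bs.getD b [] ++ l.filterMap (fun pr => if pr.1 = b then some pr.2 else none) := by
  induction l generalizing bs with
  | nil => simp [pvApply]
  | cons pr t ih =>
    have hpr : pr.1 < bs.length := hl pr (by simp)
    have := ih (bs.set pr.1 (bs.getD pr.1 [] ++ [pr.2]))
      (by simpa using hb) (by intro q hq; simpa using hl q (by simp [hq]))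
    simp only [pvApply, List.foldl_cons] at this ⊢
    rw [this, List.filterMap_cons]
    by_cases hc : pr.1 = b
    · subst hc
      rw [show (bs.set pr.1 (bs.getD pr.1 [] ++ [pr.2])).getD pr.1 [] = bs.getD pr.1 [] ++ [pr.2] by
        simp [List.getD, hpr]]
      simp
    · simp only [if_neg hc]
      rw [show (bs.set pr.1 (bs.getD pr.1 [] ++ [pr.2])).getD b [] = bs.getD b [] by
        simp [List.getD, List.getElem?_set_ne hc]]

lemma pvSt_snoc (arr : List Int) (L : Nat) (p : List Nat) (c : Nat)
    (h : p.length < arr.length) :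
    pvSt arr L (p ++ [c]) =
      (pvSt arr L p).set c ((pvSt arr L p).getD c [] ++ [arr.getD p.length 0]) := by
  unfold pvSt
  rw [pvZip_snoc p c arr h]
  unfold pvApply
  rw [List.foldl_append]
  rfl


lemma pvSt_length (arr : List Int) (L : Nat) (p : List Nat) : (pvSt arr L p).length = L := by
  unfold pvSt; rw [pvApply_length]; simp


lemma pvSt_bucket (arr : List Int) (L : Nat) (p : List Nat) (b : Nat) (hb : b < L)
    (hp : ∀ x ∈ p, x < L) :
    (pvSt arr L p).getD b [] =
      (p.zip arr).filterMap (fun pr => if pr.1 = b then some pr.2 else none) := by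
  unfold pvSt
  rw [pvApply_getD _ _ b (by simpa) (by intro pr hpr; have := List.of_mem_zip hpr; simpa using hp _ this.1)]
  simp


lemma pvSt_inj (arr : List Int) (L : Nat) (hnd : arr.Nodup ∨ L ≤ 1)
    (q1 q2 : List Nat) (hlen : q1.length = q2.length) (hn : q1.length ≤ arr.length)
    (h1 : ∀ b ∈ q1, b < L) (h2 : ∀ b ∈ q2, b < L)
    (hk : pvSortedKey (pvSt arr L q1) = pvSortedKey (pvSt arr L q2)) : q1 = q2 := by
  rcases hnd with hnd | hL
  · by_contra hne
    -- find a differing position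
    have hex : ∃ i, ∃ h : i < q1.length, q1[i] ≠ q2[i]'(hlen ▸ h) := by
      by_contra hall
      push Not at hall
      exact hne (List.ext_getElem hlen (fun i hi hi2 => hall i hi))
    obtain ⟨i, hi, hne2⟩ := hex
    set b := q1[i] with hbdef
    have hb : b < L := h1 _ (List.getElem_mem hi)
    -- equal sorted buckets at position b
    have hkb : PySem.List.sorted ((pvSt arr L q1).getD b []) (fun x => x) false
        = PySem.List.sorted ((pvSt arr L q2).getD b []) (fun x => x) false := by
      have hlen1 : b < (pvSt arr L q1).length := by rw [pvSt_length]; exact hb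
      have hlen2 : b < (pvSt arr L q2).length := by rw [pvSt_length]; exact hb
      have := congrArg (fun l => l.getD b ([] : List Int)) hk
      simpa [pvSortedKey, List.getD, List.getElem?_map, hlen1, hlen2,
        List.getElem?_eq_getElem, List.getD_eq_getElem] using this
    have hmem1 : arr[i]'(lt_of_lt_of_le hi hn) ∈ (pvSt arr L q1).getD b [] := by
      rw [pvSt_bucket arr L q1 b hb h1]
      refine List.mem_filterMap.2 ⟨(b, arr[i]'(lt_of_lt_of_le hi hn)), ?_, by simp⟩
      have : (q1.zip arr)[i]'(by simp [List.length_zip]; omega) = (b, arr[i]'(by omega)) := by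
        simp [List.getElem_zip, hbdef]
      rw [← this]; exact List.getElem_mem _
    have hmem2 : arr[i]'(lt_of_lt_of_le hi hn) ∈ (pvSt arr L q2).getD b [] := by
      exact (PySem.List.mem_sorted _ _ _ _).1 (hkb ▸ (PySem.List.mem_sorted _ _ _ _).2 hmem1)
    rw [pvSt_bucket arr L q2 b hb h2] at hmem2
    obtain ⟨pr, hpr, hpr2⟩ := List.mem_filterMap.1 hmem2
    obtain ⟨j, hj, hjeq⟩ := List.mem_iff_getElem.1 hpr
    have hj2 : j < q2.length := by simp [List.length_zip] at hj; omega
    have hja : j < arr.length := by simp [List.length_zip] at hj; omega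
    rw [List.getElem_zip] at hjeq
    split at hpr2
    · rename_i hq2j
      have heq : arr[j] = arr[i]'(lt_of_lt_of_le hi hn) := by
        simpa [← hjeq] using hpr2
      have hij : j = i := by
        exact (List.Nodup.getElem_inj_iff hnd).1 heq
      subst hij
      have : q2[j]'hj2 = b := by simpa [← hjeq] using hq2j
      exact hne2 (by omega)
    · exact absurd hpr2 (by simp)
  · -- L ≤ 1: every entry is 0, equal lengths force equality
    refine List.ext_getElem hlen (fun i hi hi2 => ?_)
    have := h1 _ (List.getElem_mem hi)
    have := h2 _ (List.getElem_mem hi2)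
    omega

lemma pvExt_disjoint (arr : List Int) (L n : Nat) (hnd : arr.Nodup ∨ L ≤ 1)
    (hn : n ≤ arr.length) (p : List Nat) (hp : ∀ b ∈ p, b < L) (c c' : Nat)
    (hc : c < L) (hc' : c' < L) (hne : c ≠ c') (k : PKey)
    (h1 : pvExt arr L n (p ++ [c]) k) (h2 : pvExt arr L n (p ++ [c']) k) : False := by
  obtain ⟨e1, he1, hl1, hk1⟩ := h1
  obtain ⟨e2, he2, hl2, hk2⟩ := h2
  rw [hk1] at hk2
  have hq1 : ∀ b ∈ p ++ [c] ++ e1, b < L := by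
    intro b hb
    rcases List.mem_append.1 hb with hb' | hb'
    · rcases List.mem_append.1 hb' with h2 | h2
      · exact hp b h2
      · rw [List.mem_singleton] at h2; subst h2; exact hc
    · exact he1 b hb'
  have hq2 : ∀ b ∈ p ++ [c'] ++ e2, b < L := by
    intro b hb
    rcases List.mem_append.1 hb with hb' | hb'
    · rcases List.mem_append.1 hb' with h2 | h2
      · exact hp b h2
      · rw [List.mem_singleton] at h2; subst h2; exact hc'
    · exact he2 b hb'
  have hlen12 : (p ++ [c] ++ e1).length = (p ++ [c'] ++ e2).length := by
    have := congrArg Prod.fst hk2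
    simp only [pvKeyOf] at this
    have := Option.some.inj this
    exact_mod_cast this
  have hkey : pvSortedKey (pvSt arr L (p ++ [c] ++ e1)) = pvSortedKey (pvSt arr L (p ++ [c'] ++ e2)) :=
    congrArg Prod.snd hk2
  have heq := pvSt_inj arr L hnd _ _ hlen12 (by simp at hl1 ⊢; omega) hq1 hq2 hkey
  have : c = c' := by
    have := congrArg (fun l => l.getD p.length 0) heq
    simpa using this
  exact hne this



def pvStepA (arr : List Int) (m : Int) (f index : Nat) (st : List (List Int)) :
    List (List (List Int)) × PMemo → Int × List Int → List (List (List Int)) × PMemo :=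
  fun acc p =>
    (acc.1 ++ (pvDpA arr arr.length m f (index+1)
        (st.take p.1.toNat ++ [p.2 ++ [arr.getD index 0]] ++ st.drop (p.1.toNat+1)) acc.2).1,
     (pvDpA arr arr.length m f (index+1)
        (st.take p.1.toNat ++ [p.2 ++ [arr.getD index 0]] ++ st.drop (p.1.toNat+1)) acc.2).2)


lemma pvDpA_step (arr : List Int) (m : Int) (f index : Nat) (st : List (List Int)) (memo : PMemo)
    (hne : index ≠ arr.length)
    (hkey : memo.get? (some (index : Int), pvSortedKey st) = none)
    (hnb : ¬ ((st.length : Int) < m)) :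
    pvDpA arr arr.length m (f+1) index st memo =
      (((PySem.List.enumerate st).foldl (pvStepA arr m f index st) ([], memo)).1,
       ((PySem.List.enumerate st).foldl (pvStepA arr m f index st) ([], memo)).2.insert
         (some (index : Int), pvSortedKey st)
         (((PySem.List.enumerate st).foldl (pvStepA arr m f index st) ([], memo)).1)) := by
  conv_lhs => rw [pvDpA]
  rw [if_neg hne]
  simp only [hkey]
  rw [if_neg hnb]
  rfl


lemma pvDpN_step (arr : List Int) (m : Int) (f index : Nat) (st : List (List Int))
    (hne : index ≠ arr.length)
    (hnb : ¬ ((st.length : Int) < m)) :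
    pvDpN arr arr.length m (f+1) index st =
      (PySem.List.enumerate st).foldl
        (fun acc p => acc ++ pvDpN arr arr.length m f (index+1)
          (st.take p.1.toNat ++ [p.2 ++ [arr.getD index 0]] ++ st.drop (p.1.toNat+1))) [] := by
  conv_lhs => rw [pvDpN]
  rw [if_neg hne]
  show (if (st.length : Int) < m then _ else _) = _
  rw [if_neg hnb]


lemma pvFold_children (arr : List Int) (m : Int) (f : Nat) (p : List Nat)
    (hnd : arr.Nodup ∨ m.toNat ≤ 1)
    (hp : ∀ b ∈ p, b < m.toNat)
    (hIH : ∀ (c : Nat), c < m.toNat → ∀ memo : PMemo,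
      (∀ l, memo.get? (none, l) = none) →
      (∀ k, pvExt arr m.toNat arr.length (p ++ [c]) k → memo.get? k = none) →
      (pvDpA arr arr.length m f (p.length+1) (pvSt arr m.toNat (p++[c])) memo).1
        = pvDpN arr arr.length m f (p.length+1) (pvSt arr m.toNat (p++[c]))
      ∧ (∀ l, (pvDpA arr arr.length m f (p.length+1) (pvSt arr m.toNat (p++[c])) memo).2.get? (none, l) = none)
      ∧ (∀ k, ¬ pvExt arr m.toNat arr.length (p++[c]) k →
          (pvDpA arr arr.length m f (p.length+1) (pvSt arr m.toNat (p++[c])) memo).2.get? k = memo.get? k)) :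
    ∀ (cs : List Nat) (accA : List (List (List Int))) (memo : PMemo),
      (∀ c ∈ cs, c < m.toNat) → cs.Nodup →
      (∀ k c, c ∈ cs → pvExt arr m.toNat arr.length (p ++ [c]) k → memo.get? k = none) →
      (∀ l, memo.get? (none, l) = none) →
      (cs.foldl (fun acc c =>
          ((acc.1 ++ (pvDpA arr arr.length m f (p.length+1) (pvSt arr m.toNat (p++[c])) acc.2).1),
           (pvDpA arr arr.length m f (p.length+1) (pvSt arr m.toNat (p++[c])) acc.2).2)) (accA, memo)).1
        = accA ++ cs.flatMap (fun c => pvDpN arr arr.length m f (p.length+1) (pvSt arr m.toNat (p++[c])))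
      ∧ (∀ l, (cs.foldl (fun acc c =>
          ((acc.1 ++ (pvDpA arr arr.length m f (p.length+1) (pvSt arr m.toNat (p++[c])) acc.2).1),
           (pvDpA arr arr.length m f (p.length+1) (pvSt arr m.toNat (p++[c])) acc.2).2)) (accA, memo)).2.get? (none, l) = none)
      ∧ (∀ k, (∀ c ∈ cs, ¬ pvExt arr m.toNat arr.length (p++[c]) k) →
          (cs.foldl (fun acc c =>
          ((acc.1 ++ (pvDpA arr arr.length m f (p.length+1) (pvSt arr m.toNat (p++[c])) acc.2).1),
           (pvDpA arr arr.length m f (p.length+1) (pvSt arr m.toNat (p++[c])) acc.2).2)) (accA, memo)).2.get? k = memo.get? k) := by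
  intro cs
  induction cs with
  | nil =>
    intro accA memo _ _ _ hinv
    refine ⟨by simp, fun l => hinv l, fun k _ => rfl⟩
  | cons c cs' ih =>
    intro accA memo hcs hnodup hmiss hinv
    have hcL : c < m.toNat := hcs c (by simp)
    have hchild := hIH c hcL memo hinv (fun k hk => hmiss k c (by simp) hk)
    obtain ⟨h1, h2, h3⟩ := hchild
    set r := pvDpA arr arr.length m f (p.length+1) (pvSt arr m.toNat (p++[c])) memo with hr
    rw [List.foldl_cons]
    have hrest := ih (accA ++ r.1) r.2
      (fun c' hc' => hcs c' (by simp [hc']))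
      (List.Nodup.of_cons hnodup)
      (by
        intro k c' hc' hk
        have hne : c ≠ c' := by
          rintro rfl
          exact (List.nodup_cons.1 hnodup).1 hc'
        have hnotc : ¬ pvExt arr m.toNat arr.length (p ++ [c]) k := by
          intro hkc
          exact pvExt_disjoint arr m.toNat arr.length hnd (le_refl _) p hp c c' hcL
            (hcs c' (by simp [hc'])) hne k hkc hk
        rw [h3 k hnotc]
        exact hmiss k c' (by simp [hc']) hk)
      h2
    obtain ⟨g1, g2, g3⟩ := hrest
    refine ⟨?_, g2, ?_⟩
    · rw [g1, h1]
      simp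
    · intro k hk
      have hkc : ¬ pvExt arr m.toNat arr.length (p ++ [c]) k := hk c (by simp)
      rw [g3 k (fun c' hc' => hk c' (by simp [hc']))]
      exact h3 k hkc


lemma pvDpA_eq_dpN (arr : List Int) (m : Int)
    (hnd : arr.Nodup ∨ m.toNat ≤ 1) :
    ∀ (fuel : Nat) (p : List Nat) (memo : PMemo),
      p.length + fuel = arr.length → (∀ b ∈ p, b < m.toNat) →
      (∀ l, memo.get? (none, l) = none) →
      (∀ k, pvExt arr m.toNat arr.length p k → memo.get? k = none) →
      (pvDpA arr arr.length m fuel p.length (pvSt arr m.toNat p) memo).1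
          = pvDpN arr arr.length m fuel p.length (pvSt arr m.toNat p)
      ∧ (∀ l, ((pvDpA arr arr.length m fuel p.length (pvSt arr m.toNat p) memo).2).get? (none, l) = none)
      ∧ (∀ k, ¬ pvExt arr m.toNat arr.length p k →
          ((pvDpA arr arr.length m fuel p.length (pvSt arr m.toNat p) memo).2).get? k = memo.get? k) := by
  intro fuel
  induction fuel with
  | zero =>
    intro p memo hflen hp hinv hmiss
    have hidx : p.length = arr.length := by omega
    have hA : pvDpA arr arr.length m 0 p.length (pvSt arr m.toNat p) memo
        = ((if pvOk m (pvSt arr m.toNat p) then [pvSt arr m.toNat p] else []), memo) := by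
      conv_lhs => rw [pvDpA]
      rw [if_pos hidx]
      rw [show memo.get? (none, pvSortedKey (pvSt arr m.toNat p)) = none from hinv _]
      show (if pvOk m (pvSt arr m.toNat p) then
          (if (none : Option (List (List (List Int)))).isSome then [] else [pvSt arr m.toNat p], memo)
        else ([], memo)) = _
      by_cases hok : pvOk m (pvSt arr m.toNat p) <;> simp [hok]
    have hN : pvDpN arr arr.length m 0 p.length (pvSt arr m.toNat p)
        = (if pvOk m (pvSt arr m.toNat p) then [pvSt arr m.toNat p] else []) := by
      conv_lhs => rw [pvDpN]
      rw [if_pos hidx]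
    rw [hA, hN]
    exact ⟨rfl, fun l => hinv l, fun k _ => rfl⟩
  | succ f IH =>
    intro p memo hflen hp hinv hmiss
    have hlt : p.length < arr.length := by omega
    have hne : p.length ≠ arr.length := by omega
    have hkeyExt : pvExt arr m.toNat arr.length p (some ((p.length : Nat) : Int), pvSortedKey (pvSt arr m.toNat p)) := by
      refine ⟨[], by simp, by simpa using hlt, ?_⟩
      simp [pvKeyOf]
    have hkey : memo.get? (some ((p.length : Nat) : Int), pvSortedKey (pvSt arr m.toNat p)) = none :=
      hmiss _ hkeyExt
    have hnb : ¬ (((pvSt arr m.toNat p).length : Int) < m) := by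
      rw [pvSt_length]; exact not_lt.2 (Int.self_le_toNat m)
    have hExtMono : ∀ (c : Nat) (k : PKey), c < m.toNat →
        pvExt arr m.toNat arr.length (p ++ [c]) k → pvExt arr m.toNat arr.length p k := by
      intro c k hc ⟨e, he, hl, hk⟩
      refine ⟨c :: e, ?_, by simp at hl ⊢; omega, ?_⟩
      · intro b hb; rcases List.mem_cons.1 hb with rfl | hb
        · exact hc
        · exact he b hb
      · rw [hk]; simp [pvKeyOf]
    -- the per-child induction hypothesis, in snoc form
    have hIH : ∀ (c : Nat), c < m.toNat → ∀ memo' : PMemo,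
        (∀ l, memo'.get? (none, l) = none) →
        (∀ k, pvExt arr m.toNat arr.length (p ++ [c]) k → memo'.get? k = none) →
        (pvDpA arr arr.length m f (p.length+1) (pvSt arr m.toNat (p++[c])) memo').1
          = pvDpN arr arr.length m f (p.length+1) (pvSt arr m.toNat (p++[c]))
        ∧ (∀ l, (pvDpA arr arr.length m f (p.length+1) (pvSt arr m.toNat (p++[c])) memo').2.get? (none, l) = none)
        ∧ (∀ k, ¬ pvExt arr m.toNat arr.length (p++[c]) k →
            (pvDpA arr arr.length m f (p.length+1) (pvSt arr m.toNat (p++[c])) memo').2.get? k = memo'.get? k) := by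
      intro c hc memo' hinv' hmiss'
      have := IH (p ++ [c]) memo' (by simp; omega)
        (by intro b hb; rcases List.mem_append.1 hb with hb | hb
            · exact hp b hb
            · rw [List.mem_singleton] at hb; subst hb; exact hc)
        hinv' hmiss'
      simpa using this
    -- rewrite the enumerate folds as folds over List.range m.toNat
    have hlenst : (pvSt arr m.toNat p).length = m.toNat := pvSt_length arr m.toNat p
    have hgetD : ∀ (c : Nat), c < m.toNat →
        PySem.List.pyGetD (pvSt arr m.toNat p) (c : Int) [] = (pvSt arr m.toNat p).getD c [] := by
      intro c hc
      have hcs : c < (pvSt arr m.toNat p).length := by omega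
      rw [PySem.List.pyGetD_eq_getElem _ [] (by positivity) (by exact_mod_cast hcs)]
      rw [List.getD_eq_getElem _ [] hcs]
      simp
    have hchild : ∀ (c : Nat), c < m.toNat →
        (pvSt arr m.toNat p).take c
            ++ [PySem.List.pyGetD (pvSt arr m.toNat p) (c : Int) [] ++ [arr.getD p.length 0]]
            ++ (pvSt arr m.toNat p).drop (c+1)
          = pvSt arr m.toNat (p ++ [c]) := by
      intro c hc
      have hcs : c < (pvSt arr m.toNat p).length := by omega
      rw [hgetD c hc]
      rw [pvSt_snoc arr m.toNat p c hlt]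
      rw [List.set_eq_take_cons_drop _ hcs]
      simp
    have henum : PySem.List.enumerate (pvSt arr m.toNat p)
        = (List.range m.toNat).map (fun c : Nat => ((c : Int), PySem.List.pyGetD (pvSt arr m.toNat p) (c : Int) [])) := by
      rw [PySem.List.enumerate_eq_map_pyRange _ []]
      rw [show PySem.List.len (pvSt arr m.toNat p) = ((m.toNat : Nat) : Int) by simp [PySem.List.len_eq, hlenst]]
      rw [PySem.List.pyRange_zero_natCast, List.map_map]
      simp [Function.comp_def]
    have hAfold : (PySem.List.enumerate (pvSt arr m.toNat p)).foldl
          (pvStepA arr m f p.length (pvSt arr m.toNat p)) ([], memo)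
        = (List.range m.toNat).foldl (fun acc c =>
            ((acc.1 ++ (pvDpA arr arr.length m f (p.length+1) (pvSt arr m.toNat (p++[c])) acc.2).1),
             (pvDpA arr arr.length m f (p.length+1) (pvSt arr m.toNat (p++[c])) acc.2).2)) ([], memo) := by
      rw [henum, List.foldl_map]
      apply PySem.List.foldl_congr_mem
      intro acc c hc
      have hcL : c < m.toNat := List.mem_range.mp hc
      show ((acc.1 ++ (pvDpA arr arr.length m f (p.length+1)
            ((pvSt arr m.toNat p).take ((c : Int)).toNat
              ++ [PySem.List.pyGetD (pvSt arr m.toNat p) (c : Int) [] ++ [arr.getD p.length 0]]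
              ++ (pvSt arr m.toNat p).drop (((c : Int)).toNat+1)) acc.2).1),
          (pvDpA arr arr.length m f (p.length+1)
            ((pvSt arr m.toNat p).take ((c : Int)).toNat
              ++ [PySem.List.pyGetD (pvSt arr m.toNat p) (c : Int) [] ++ [arr.getD p.length 0]]
              ++ (pvSt arr m.toNat p).drop (((c : Int)).toNat+1)) acc.2).2) = _
      rw [Int.toNat_natCast, hchild c hcL]
    have hNfold : (PySem.List.enumerate (pvSt arr m.toNat p)).foldl
          (fun acc q => acc ++ pvDpN arr arr.length m f (p.length+1)
            ((pvSt arr m.toNat p).take q.1.toNat ++ [q.2 ++ [arr.getD p.length 0]]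
              ++ (pvSt arr m.toNat p).drop (q.1.toNat+1))) []
        = (List.range m.toNat).flatMap
            (fun c => pvDpN arr arr.length m f (p.length+1) (pvSt arr m.toNat (p++[c]))) := by
      rw [henum, List.foldl_map]
      rw [PySem.List.foldl_congr_mem (List.range m.toNat) _
        (fun acc c => acc ++ pvDpN arr arr.length m f (p.length+1) (pvSt arr m.toNat (p++[c]))) []
        (by
          intro acc c hc
          have hcL : c < m.toNat := List.mem_range.mp hc
          show acc ++ pvDpN arr arr.length m f (p.length+1)
              ((pvSt arr m.toNat p).take ((c : Int)).toNat
                ++ [PySem.List.pyGetD (pvSt arr m.toNat p) (c : Int) [] ++ [arr.getD p.length 0]]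
                ++ (pvSt arr m.toNat p).drop (((c : Int)).toNat+1)) = _
          rw [Int.toNat_natCast, hchild c hcL])]
      simpa using PySem.List.foldl_append_eq_flatMap
        (fun c => pvDpN arr arr.length m f (p.length+1) (pvSt arr m.toNat (p++[c]))) (List.range m.toNat) []
    have hfold := pvFold_children arr m f p hnd hp hIH (List.range m.toNat) [] memo
      (fun c hc => List.mem_range.mp hc)
      (List.nodup_range)
      (fun k c hc hk => hmiss k (hExtMono c k (List.mem_range.mp hc) hk))
      hinv
    obtain ⟨g1, g2, g3⟩ := hfold
    rw [pvDpA_step arr m f p.length (pvSt arr m.toNat p) memo hne hkey hnb]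
    rw [pvDpN_step arr m f p.length (pvSt arr m.toNat p) hne hnb]
    rw [hNfold, hAfold]

    refine ⟨?_, ?_, ?_⟩
    · simpa using g1
    · intro l
      rw [PySem.Dict.get?_insert_of_ne _ _ (by simp)]
      exact g2 l
    · intro k hk
      have hkne : k ≠ (some ((p.length : Nat) : Int), pvSortedKey (pvSt arr m.toNat p)) := by
        rintro rfl
        exact hk hkeyExt
      rw [PySem.Dict.get?_insert_of_ne _ _ hkne]
      exact g3 k (fun c hc hkc => hk (hExtMono c k (List.mem_range.mp hc) hkc))

lemma pvSpecFold_eq (arr : List Int) (m : Int) (index : Nat) (subsets : List (List Int)) (fuel : Nat) :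
    pvSpecFold arr m index subsets fuel =
      ((pvAssignN m.toNat fuel).filter
        (fun asg => pvOk m (pvApply subsets (asg.zip (arr.drop index))))).map
        (fun asg => pvApply subsets (asg.zip (arr.drop index))) := by
  unfold pvSpecFold
  simpa using PySem.List.foldl_append_if
    (fun asg => pvOk m (pvApply subsets (asg.zip (arr.drop index))))
    (fun asg => pvApply subsets (asg.zip (arr.drop index)))
    (l := pvAssignN m.toNat fuel) (acc := [])


lemma pvDpN_spec (arr : List Int) (m : Int) :
    ∀ (fuel index : Nat) (subsets : List (List Int)),
      index + fuel = arr.length → subsets.length = m.toNat →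
      pvDpN arr arr.length m fuel index subsets = pvSpecFold arr m index subsets fuel := by
  intro fuel
  induction fuel with
  | zero =>
    intro index subsets hidx hlen
    have h : index = arr.length := by omega
    subst h
    unfold pvDpN pvSpecFold pvAssignN
    simp only [List.foldl_cons, List.foldl_nil, List.zip_nil_left]
    show _ = (if pvOk m (pvApply subsets []) then [] ++ [pvApply subsets []] else [])
    show _ = (if pvOk m subsets then [] ++ [subsets] else [])
    by_cases hok : pvOk m subsets <;> simp [hok]
  | succ f ih =>
    intro index subsets hidx hlen
    have hne : index ≠ arr.length := by omega
    have hia : index < arr.length := by omega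
    conv_lhs => rw [pvDpN]
    rw [if_neg hne]
    show ((PySem.List.enumerate subsets).foldl
        (fun acc p =>
          acc ++ pvDpN arr arr.length m f (index+1)
            (subsets.take p.1.toNat ++ [p.2 ++ [arr.getD index 0]] ++ subsets.drop (p.1.toNat+1))) [] |>
      (fun step => if (subsets.length : Int) < m then
        step ++ pvDpN arr arr.length m f (index+1) (subsets ++ [[arr.getD index 0]])
      else step)) = _
    simp only []
    rw [if_neg (by rw [hlen]; exact not_lt.2 (Int.self_le_toNat m))]
    rw [PySem.List.foldl_append_eq_flatMap, List.nil_append]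
    rw [PySem.List.enumerate_eq_map_pyRange subsets [], List.flatMap_map]
    have hlen' : PySem.List.len subsets = ((m.toNat : Nat) : Int) := by
      simp [PySem.List.len_eq, hlen]
    rw [hlen', PySem.List.pyRange_zero_natCast, List.flatMap_map]
    -- right-hand side
    rw [pvSpecFold_eq]
    show _ = ((((List.range m.toNat).flatMap
        (fun b => (pvAssignN m.toNat f).map (fun t => b :: t))).filter
        (fun asg => pvOk m (pvApply subsets (asg.zip (arr.drop index))))).map
        (fun asg => pvApply subsets (asg.zip (arr.drop index))))
    rw [List.filter_flatMap, List.map_flatMap]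
    simp only [List.flatMap_def]
    congr 1
    apply List.map_congr_left
    intro c hc
    have hcL : c < m.toNat := List.mem_range.mp hc
    have hcs : c < subsets.length := by omega
    have e1 : ((c : Int)).toNat = c := Int.toNat_natCast c
    have e2 : PySem.List.pyGetD subsets (c : Int) [] = subsets[c] := by
      rw [PySem.List.pyGetD_eq_getElem subsets [] (by positivity) (by exact_mod_cast hcs)]
      simp
    rw [e1, e2]
    have e3 : subsets.take c ++ [subsets[c] ++ [arr.getD index 0]] ++ subsets.drop (c+1)
        = subsets.set c (subsets[c] ++ [arr.getD index 0]) := by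
      rw [List.set_eq_take_cons_drop _ hcs]
      simp
    rw [e3]
    rw [ih (index+1) _ (by omega) (by simp [hlen])]
    rw [pvSpecFold_eq]
    rw [List.filter_map, List.map_map]
    have key : ∀ t : List Nat,
        pvApply subsets ((c :: t).zip (arr.drop index))
          = pvApply (subsets.set c (subsets[c] ++ [arr.getD index 0])) (t.zip (arr.drop (index+1))) := by
      intro t
      rw [List.drop_eq_getElem_cons hia, List.zip_cons_cons]
      show List.foldl _ _ _ = _
      rw [List.foldl_cons]
      simp only [List.getD_eq_getElem, hcs, hia]
      rfl
    have hF : ((fun asg : List Nat => pvApply subsets (asg.zip (arr.drop index))) ∘ (fun t => c :: t))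
        = (fun t : List Nat => pvApply (subsets.set c (subsets[c] ++ [arr.getD index 0])) (t.zip (arr.drop (index+1)))) :=
      funext fun t => key t
    have hP : ((fun asg : List Nat => pvOk m (pvApply subsets (asg.zip (arr.drop index)))) ∘ (fun t => c :: t))
        = (fun t : List Nat => pvOk m (pvApply (subsets.set c (subsets[c] ++ [arr.getD index 0])) (t.zip (arr.drop (index+1))))) :=
      funext fun t => congrArg (pvOk m) (key t)
    rw [hP, hF]

lemma pvAssignments_eq (m : Int) (fuel : Nat) :
    pvAssignments m fuel = (pvAssignN m.toNat fuel).map (fun t => t.map (fun c : Nat => (c : Int))) := by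
  induction fuel with
  | zero => rfl
  | succ n ih =>
    show (PySem.List.pyRange 0 m 1).flatMap (fun b => (pvAssignments m n).map (fun t => b :: t)) = _
    have hr : PySem.List.pyRange 0 m 1 = (List.range m.toNat).map (fun k : Nat => (k : Int)) := by
      rw [PySem.List.pyRange_one]
      simp
    rw [hr, ih]
    show _ = ((List.range m.toNat).flatMap (fun b => (pvAssignN m.toNat n).map (fun t => b :: t))).map
      (fun t => t.map (fun c : Nat => (c : Int)))
    rw [List.flatMap_map, List.map_flatMap]
    simp [List.map_map, Function.comp_def]


lemma pvAssignN_length (L : Nat) : ∀ (fuel : Nat), ∀ t ∈ pvAssignN L fuel, t.length = fuel := by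
  intro fuel
  induction fuel with
  | zero => intro t ht; simp [pvAssignN] at ht; simp [ht]
  | succ n ih =>
    intro t ht
    simp only [pvAssignN, List.mem_flatMap, List.mem_map] at ht
    obtain ⟨b, _, t', ht', rfl⟩ := ht
    simp [ih t' ht']


lemma pvBuckets_fold (arr : List Int) :
    ∀ (asg : List Nat) (s : Nat) (bs : List (List Int)), s + asg.length ≤ arr.length →
      (PySem.List.enumerate (asg.map (fun c : Nat => (c : Int))) (s : Int)).foldl
        (fun bs p => bs.set p.2.toNat ((bs.getD p.2.toNat []) ++ [arr.getD p.1.toNat 0])) bs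
      = pvApply bs (asg.zip (arr.drop s)) := by
  intro asg
  induction asg with
  | nil => intro s bs h; rfl
  | cons c t ih =>
    intro s bs h
    have hs : s < arr.length := by simp at h; omega
    rw [List.map_cons, PySem.List.enumerate_cons, List.foldl_cons]
    rw [List.drop_eq_getElem_cons hs, List.zip_cons_cons]
    show _ = pvApply _ _
    unfold pvApply
    rw [List.foldl_cons]
    have e1 : ((s : Int)).toNat = s := Int.toNat_natCast s
    have e2 : ((c : Int)).toNat = c := Int.toNat_natCast c
    have e3 : arr.getD s 0 = arr[s] := List.getD_eq_getElem arr 0 hs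
    rw [e1, e2, e3]
    have := ih (s+1) (bs.set c (bs.getD c [] ++ [arr[s]])) (by simp at h ⊢; omega)
    rw [show ((s : Int) + 1) = ((s+1 : Nat) : Int) by push_cast; ring]
    exact this


lemma pvAlt_eq_spec (arr : List Int) (m : Int) :
    partitions_with_min_elements_alt arr m =
      pvSpecFold arr m 0 (List.replicate m.toNat []) arr.length := by
  unfold partitions_with_min_elements_alt pvSpecFold
  rw [pvAssignments_eq, List.foldl_map]
  have hinit : (PySem.List.pyRange 0 m 1).map (fun _ => ([] : List Int))
      = List.replicate m.toNat [] := by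
    rw [List.map_const']
    simp [PySem.List.length_pyRange_one]
  apply PySem.List.foldl_congr_mem
  intro acc t ht
  have hlen : t.length = arr.length := pvAssignN_length m.toNat arr.length t ht
  have := pvBuckets_fold arr t 0 (List.replicate m.toNat []) (by omega)
  simp only [List.drop_zero] at this ⊢
  show (if pvOk m (pvBuckets arr m (t.map (fun c : Nat => (c : Int)))) then
      acc ++ [pvBuckets arr m (t.map (fun c : Nat => (c : Int)))] else acc) = _
  rw [show pvBuckets arr m (t.map (fun c : Nat => (c : Int))) = pvApply (List.replicate m.toNat []) (t.zip arr) by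
    unfold pvBuckets
    rw [hinit]
    rw [show ((PySem.List.enumerate (t.map (fun c : Nat => (c : Int))) : List (Int × Int))) =
      PySem.List.enumerate (t.map (fun c : Nat => (c : Int))) ((0 : Nat) : Int) by norm_num]
    exact this]

-- ===== VERDICT (by name: the statement is the Claim_ definition above) =====
theorem partitions_with_min_elements_spec : Claim_equal_partitions_with_min_elements := by
  intro arr m _ hpre
  unfold Spec_partitions_with_min_elements
  have hnd : arr.Nodup ∨ m.toNat ≤ 1 := by
    rcases hpre with h | h
    · right; omega
    · left; exact h
  have h0 := pvDpA_eq_dpN arr m hnd arr.length [] PySem.Dict.empty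
    (by simp) (by simp) (by intro l; rfl) (by intro k _; rfl)
  have hst : pvSt arr m.toNat [] = List.replicate m.toNat [] := rfl
  rw [hst] at h0
  have h1 : partitions_with_min_elements arr m
      = pvDpN arr arr.length m arr.length 0 (List.replicate m.toNat []) := by
    simpa [partitions_with_min_elements] using h0.1
  rw [h1, pvDpN_spec arr m arr.length 0 _ (by simp) (by simp), pvAlt_eq_spec]
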